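-- pv_equiv track=rewrite | github.com/GG4GG4/ggaggalang | ggaggalang/optimizer.py | optimize_movements
-- ===== SOURCE A (Python) =====
-- from typing import List, Tuple, Dict, Set, Optional, Iterator
--
-- def optimize_movements(commands: List[str]) -> List[str]:
--     """
--     이동(gugu/gugugga) 명령어 최적화
--     연속된 이동 명령어를 압축
--
--     Args:
--         commands: 원본 명령어 목록
--
--     Returns:
--         최적화된 명령어 목록
--     """
--     optimized = []
--     i = 0
--
--     while i < len(commands):
--         cmd = commands[i]
--
--         if cmd == 'gugu' or cmd == 'gugugga':
--             # 순방향/역방향 이동 계산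
--             right_count = 0
--             j = i
--
--             while j < len(commands):
--                 if commands[j] == 'gugu':
--                     right_count += 1
--                 elif commands[j] == 'gugugga':
--                     right_count -= 1
--                 else:
--                     break
--                 j += 1
--
--             # 최적화: 순방향/역방향 상쇄 후 최소 이동으로 압축
--             if right_count > 1:
--                 optimized.append(f"RIGHT {right_count}")
--                 i = j
--             elif right_count < -1:
--                 optimized.append(f"LEFT {abs(right_count)}")
--                 i = j
--             elif right_count == 1:
--                 optimized.append('gugu')
--                 i = j
--             elif right_count == -1:
--                 optimized.append('gugugga')
--                 i = j
--             else:  # right_count == 0, 상쇄된 경우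
--                 i = j
--         else:
--             optimized.append(cmd)
--             i += 1
--
--     return optimized
-- ===== SOURCE B (Python) =====
-- def optimize_movements(commands):
--     """Single pass with a net-movement accumulator flushed at each non-move command."""
--     def flush(n, out):
--         if n > 1:
--             out.append(f"RIGHT {n}")
--         elif n < -1:
--             out.append(f"LEFT {abs(n)}")
--         elif n == 1:
--             out.append('gugu')
--         elif n == -1:
--             out.append('gugugga')
--     out = []
--     net = 0
--     for cmd in commands:
--         if cmd == 'gugu':
--             net += 1
--         elif cmd == 'gugugga':
--             net -= 1
--         else:
--             flush(net, out)
--             net = 0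
--             out.append(cmd)
--     flush(net, out)
--     return out
-- ===== Notes on version B (the rewrite author's own statement) =====
-- stated objective: simpler
-- what changed: Replaces A's index-driven outer while with a nested re-scanning inner while by one linear for-loop that keeps a running net-movement counter and flushes it at each non-movement command and at the end.
import Mathlib
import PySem

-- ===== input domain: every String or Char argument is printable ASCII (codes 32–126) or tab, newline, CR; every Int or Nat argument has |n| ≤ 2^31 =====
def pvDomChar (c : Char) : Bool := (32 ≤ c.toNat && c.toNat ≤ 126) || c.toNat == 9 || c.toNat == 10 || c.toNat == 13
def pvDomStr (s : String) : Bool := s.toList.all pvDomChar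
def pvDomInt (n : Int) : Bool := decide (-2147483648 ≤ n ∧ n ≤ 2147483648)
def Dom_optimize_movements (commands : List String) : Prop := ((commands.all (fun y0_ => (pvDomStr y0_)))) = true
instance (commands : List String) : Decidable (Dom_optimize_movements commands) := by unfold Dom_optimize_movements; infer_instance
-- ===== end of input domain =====

-- B is a simpler decomposition of A: one linear pass with a net counter flushed at
-- non-movement commands, instead of A's nested while with an index jump. Return values only.

-- ===== PORT A =====
-- inner while loop of A: count the leading run of gugu/gugugga, return (right_count, rest)
def pvA_run : List String → Int × List String
  | [] => (0, [])
  | c :: rest =>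
    if c == "gugu" then
      let p := pvA_run rest
      (p.1 + 1, p.2)
    else if c == "gugugga" then
      let p := pvA_run rest
      (p.1 - 1, p.2)
    else (0, c :: rest)

theorem pvA_run_len (l : List String) : (pvA_run l).2.length ≤ l.length := by
  induction l with
  | nil => simp [pvA_run]
  | cons c rest ih =>
    simp only [pvA_run]
    split_ifs <;> simp <;> omega

-- outer while loop of A
def optimize_movements (commands : List String) : List String :=
  match commands with
  | [] => []
  | c :: rest =>
    if c == "gugu" || c == "gugugga" then
      let p := pvA_run (c :: rest)
      (if p.1 > 1 then ["RIGHT " ++ PySem.Int.toStr p.1]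
       else if p.1 < -1 then ["LEFT " ++ PySem.Int.toStr (-p.1)]
       else if p.1 == 1 then ["gugu"]
       else if p.1 == -1 then ["gugugga"]
       else []) ++ optimize_movements p.2
    else
      c :: optimize_movements rest
termination_by commands.length
decreasing_by
  · rename_i hguard
    simp only [pvA_run]
    split_ifs with ha hb
    · simp; exact pvA_run_len rest
    · simp; exact pvA_run_len rest
    · simp [ha, hb] at hguard
  · simp

-- ===== PORT B =====
-- flush helper of B
def pvB_flush (n : Int) : List String :=
  if n > 1 then ["RIGHT " ++ PySem.Int.toStr n]
  else if n < -1 then ["LEFT " ++ PySem.Int.toStr (-n)]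
  else if n == 1 then ["gugu"]
  else if n == -1 then ["gugugga"]
  else []

-- the for-loop of B, with the running net counter as a parameter
def pvB_go : List String → Int → List String
  | [], net => pvB_flush net
  | c :: rest, net =>
    if c == "gugu" then pvB_go rest (net + 1)
    else if c == "gugugga" then pvB_go rest (net - 1)
    else pvB_flush net ++ (c :: pvB_go rest 0)

def optimize_movements_alt (commands : List String) : List String :=
  pvB_go commands 0

-- ===== PRECONDITION & SPEC =====
def Spec_optimize_movements (commands : List String) (out : List String) : Prop := out = optimize_movements_alt commands
instance (commands : List String) (out : List String) : Decidable (Spec_optimize_movements commands out) := by unfold Spec_optimize_movements; infer_instance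

-- ===== CLAIM (what is proved, stated in full; the proofs are below) =====
def Claim_equal_optimize_movements : Prop := ∀ (commands : List String), Dom_optimize_movements commands → Spec_optimize_movements commands (optimize_movements commands)

-- ===== LEMMAS AND PROOFS =====

-- A's run never consumes just part of a run: the rest returned starts with a non-move head
theorem pvA_loop_run (l : List String) :
    optimize_movements l = pvB_flush (pvA_run l).1 ++ optimize_movements (pvA_run l).2 := by
  cases l with
  | nil => simp [pvA_run, optimize_movements, pvB_flush]
  | cons c rest =>
    by_cases h1 : c == "gugu"
    · rw [optimize_movements]
      simp only [h1, Bool.true_or, if_true, pvB_flush]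
    · by_cases h2 : c == "gugugga"
      · rw [optimize_movements]
        simp only [h1, h2, Bool.false_or, if_true, pvB_flush]
      · have : pvA_run (c :: rest) = (0, c :: rest) := by
          simp [pvA_run, h1, h2]
        rw [this]
        simp [pvB_flush]

theorem pvB_go_eq (l : List String) : ∀ n : Int,
    pvB_go l n = pvB_flush (n + (pvA_run l).1) ++ optimize_movements (pvA_run l).2 := by
  induction l with
  | nil => intro n; simp [pvB_go, pvA_run, optimize_movements]
  | cons c rest ih =>
    intro n
    have hx : pvB_go rest 0 = optimize_movements rest := by
      rw [ih 0, pvA_loop_run rest]; norm_num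
    by_cases h1 : c == "gugu"
    · simp only [pvB_go, h1, if_true, pvA_run, ih]
      ring_nf
    · by_cases h2 : c == "gugugga"
      · simp [pvB_go, pvA_run, h1, h2, ih]
        ring_nf
      · simp [pvB_go, pvA_run, h1, h2, hx]
        rw [optimize_movements]
        simp [h1, h2]

-- ===== VERDICT (by name: the statement is the Claim_ definition above) =====
theorem optimize_movements_spec : Claim_equal_optimize_movements := by
  intro commands _
  unfold Spec_optimize_movements optimize_movements_alt
  rw [pvB_go_eq, pvA_loop_run]
  norm_num
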